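-- pv_equiv track=rewrite | github.com/Ganz-24/EECS4312_W26_SpecChain | src/08_metrics.py | parse_spec_line
-- ===== SOURCE A (Python) =====
-- def parse_spec_line(line: str) -> tuple[str, str]:
--     mappings = {
--         "- Description:": "description",
--         "- Source Persona:": "source_persona",
--         "- Traceability:": "traceability",
--         "- Acceptance Criteria:": "acceptance_criteria",
--         "- Notes:": "notes",
--     }
--
--     for prefix, field_name in mappings.items():
--         if line.startswith(prefix):
--             raw_value = line[len(prefix):].strip()
--             return field_name, extract_value(raw_value)
--
--     return "", ""
--
-- def extract_value(raw_value: str) -> str: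
--     raw_value = raw_value.strip()
--     if raw_value.startswith("[") and raw_value.endswith("]"):
--         return raw_value[1:-1].strip()
--     return raw_value
-- ===== SOURCE B (Python) =====
-- _FIELDS = {
--     "- Description": "description",
--     "- Source Persona": "source_persona",
--     "- Traceability": "traceability",
--     "- Acceptance Criteria": "acceptance_criteria",
--     "- Notes": "notes",
-- }
--
-- def parse_spec_line(line: str) -> tuple[str, str]:
--     key, sep, rest = line.partition(":")
--     if not sep:
--         return "", ""
--     field = _FIELDS.get(key)
--     if field is None:
--         return "", ""
--     return field, extract_value(rest.strip())
--
-- def extract_value(raw_value: str) -> str: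
--     raw_value = raw_value.strip()
--     if raw_value.startswith("[") and raw_value.endswith("]"):
--         return raw_value[1:-1].strip()
--     return raw_value
-- ===== Notes on version B (the rewrite author's own statement) =====
-- stated objective: idiomatic
-- what changed: Replaces the loop that tries startswith for each of the five prefixes with a single partition at the first colon followed by one dict lookup of the key.
import Mathlib
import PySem

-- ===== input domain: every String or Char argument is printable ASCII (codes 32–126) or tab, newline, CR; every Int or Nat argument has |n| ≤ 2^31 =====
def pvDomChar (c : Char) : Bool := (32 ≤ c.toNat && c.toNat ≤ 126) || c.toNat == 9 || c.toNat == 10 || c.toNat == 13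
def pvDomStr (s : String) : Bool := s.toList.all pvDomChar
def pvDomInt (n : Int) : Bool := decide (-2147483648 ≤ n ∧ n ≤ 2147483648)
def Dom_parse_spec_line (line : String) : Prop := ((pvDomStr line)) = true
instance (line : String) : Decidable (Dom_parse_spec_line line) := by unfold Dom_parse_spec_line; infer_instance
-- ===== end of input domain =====

-- B replaces A's prefix-scan loop by one partition at the first colon and a dict lookup on the key (idiomatic decomposition, same cost).

-- ===== PORT A =====
-- extract_value, shared verbatim by both Pythons
def pv_extract_value (raw_value : String) : String :=
  let raw := PySem.Str.strip raw_value
  if PySem.Str.startswith raw "[" && PySem.Str.endswith raw "]" then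
    PySem.Str.strip (PySem.Str.slice raw (some 1) (some (-1)))
  else raw

def pv_mappings : List (String × String) :=
  [("- Description:", "description"),
   ("- Source Persona:", "source_persona"),
   ("- Traceability:", "traceability"),
   ("- Acceptance Criteria:", "acceptance_criteria"),
   ("- Notes:", "notes")]

def parse_spec_line_loop (line : String) : List (String × String) → String × String
  | [] => ("", "")
  | (pre, field_name) :: rest =>
    if PySem.Str.startswith line pre then
      (field_name,
       pv_extract_value (PySem.Str.strip (PySem.Str.slice line (some (PySem.Str.len pre : Int)) none)))
    else parse_spec_line_loop line rest

def parse_spec_line (line : String) : String × String :=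
  parse_spec_line_loop line pv_mappings

-- ===== PORT B =====
def pv_fields : PySem.Dict String String := PySem.Dict.mk
  [("- Description", "description"),
   ("- Source Persona", "source_persona"),
   ("- Traceability", "traceability"),
   ("- Acceptance Criteria", "acceptance_criteria"),
   ("- Notes", "notes")]

def parse_spec_line_alt (line : String) : String × String :=
  -- line.partition ported by hand (exact): key = chars before the first colon;
  -- sep is empty iff no colon occurs, i.e. iff the key is the whole string
  let cs := line.toList
  let key := cs.takeWhile (· != ':')
  if key.length = cs.length then ("", "")
  else
    match PySem.Dict.get? pv_fields (String.ofList key) with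
    | none => ("", "")
    | some field => (field, pv_extract_value (PySem.Str.strip (String.ofList (cs.drop (key.length + 1)))))

-- ===== PRECONDITION & SPEC =====
def Spec_parse_spec_line (line : String) (out : String × String) : Prop := out = parse_spec_line_alt line
instance (line : String) (out : String × String) : Decidable (Spec_parse_spec_line line out) := by unfold Spec_parse_spec_line; infer_instance

-- ===== CLAIM (what is proved, stated in full; the proofs are below) =====
def Claim_equal_parse_spec_line : Prop := ∀ (line : String), Dom_parse_spec_line line → Spec_parse_spec_line line (parse_spec_line line)

-- ===== LEMMAS AND PROOFS =====

-- a colon-free prefix followed by a colon is a prefix of (k ++ colon :: r), k colon-free, exactly when it equals k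
lemma pv_prefix_colon (q : List Char) : ∀ (k r : List Char), ':' ∉ q → ':' ∉ k →
    ((q ++ [':']) <+: (k ++ ':' :: r) ↔ q = k) := by
  induction q with
  | nil =>
    intro k r _ hk
    cases k with
    | nil => simp
    | cons c k' =>
      simp only [List.nil_append, List.cons_append, List.cons_prefix_cons]
      constructor
      · rintro ⟨h1, -⟩
        exact absurd h1.symm (by intro h; exact hk (h ▸ List.mem_cons_self))
      · intro h; cases h
  | cons a q' ih =>
    intro k r hq hk
    cases k with
    | nil =>
      simp only [List.cons_append, List.nil_append, List.cons_prefix_cons]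
      constructor
      · rintro ⟨h1, -⟩
        exact absurd h1 (by intro h; exact hq (h ▸ List.mem_cons_self))
      · intro h; cases h
    | cons c k' =>
      simp only [List.cons_append, List.cons_prefix_cons]
      rw [ih k' r (fun h => hq (List.mem_cons_of_mem _ h)) (fun h => hk (List.mem_cons_of_mem _ h))]
      constructor
      · rintro ⟨h1, h2⟩; rw [h1, h2]
      · intro h; injection h with h1 h2; exact ⟨h1, h2⟩

lemma pv_sw_iff (line : String) (k r : List Char) (hcs : line.toList = k ++ ':' :: r)
    (hk : ':' ∉ k) (p q : String) (hpq : p.toList = q.toList ++ [':']) (hq : ':' ∉ q.toList) :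
    PySem.Str.startswith line p = decide (q.toList = k) := by
  rcases Decidable.em (q.toList = k) with h | h
  · simp only [h, decide_true]
    rw [PySem.Str.startswith_eq]
    rw [PySem.Chars.startswith_iff, hpq, hcs, h]
    exact ⟨r, by simp⟩
  · simp only [h, decide_false]
    rw [PySem.Str.startswith_eq]
    apply Bool.eq_false_iff.mpr
    intro hsw
    rw [PySem.Chars.startswith_iff, hpq, hcs] at hsw
    exact h ((pv_prefix_colon _ _ _ hq hk).mp hsw)

lemma pv_no_colon_no_prefix (line : String) (hnc : ':' ∉ line.toList)
    (p : String) (hp : ':' ∈ p.toList) : PySem.Str.startswith line p = false := by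
  rw [PySem.Str.startswith_eq]
  apply Bool.eq_false_iff.mpr
  intro hsw
  rw [PySem.Chars.startswith_iff] at hsw
  exact hnc (hsw.subset hp)

-- on a literal dict the lookup condition is an equality of the key's characters
lemma pv_beq (k : List Char) (lit : String) : (lit == String.ofList k) = decide (lit.toList = k) := by
  rcases Decidable.em (lit.toList = k) with h | h
  · have : lit = String.ofList k := String.toList_inj.mp (by simp [h])
    simp [this]
  · simp only [h, decide_false]
    exact beq_eq_false_iff_ne.mpr (fun he => h (by rw [he]; simp))

-- the string A hands to extract_value equals the one B hands to it, in the matched branch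
lemma pv_value_eq (line : String) (k r : List Char) (_hcs : line.toList = k ++ ':' :: r)
    (p q : String) (hpq : p.toList = q.toList ++ [':']) (h : q.toList = k) :
    PySem.Str.strip (PySem.Str.slice line (some (PySem.Str.len p : Int)) none)
      = PySem.Str.strip (String.ofList (line.toList.drop (k.length + 1))) := by
  congr 1
  apply String.toList_inj.mp
  have hlen : PySem.Str.len p = ((k.length + 1 : Nat) : Int) := by
    rw [PySem.Str.len_eq, hpq, h]; simp [List.length_append]
  rw [hlen]
  simp only [PySem.Str.toList_slice, PySem.Chars.slice_eq_listSlice, String.toList_ofList]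
  exact PySem.List.slice_from_natCast (xs := line.toList) (a := k.length + 1)

lemma pv_main (line : String) : parse_spec_line line = parse_spec_line_alt line := by
  have hspan := List.takeWhile_append_dropWhile (p := (· != ':')) (l := line.toList)
  have hk : ':' ∉ line.toList.takeWhile (· != ':') := by
    intro hm
    have := List.mem_takeWhile_imp hm
    simp at this
  cases hd : line.toList.dropWhile (· != ':') with
  | nil =>
    have hkc : line.toList.takeWhile (· != ':') = line.toList := by
      rw [hd, List.append_nil] at hspan; exact hspan
    have hnc : ':' ∉ line.toList := fun hm => hk (by rw [hkc]; exact hm)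
    have hin : ∀ p : String, ':' ∈ p.toList → PySem.Str.startswith line p = false :=
      fun p hp => pv_no_colon_no_prefix line hnc p hp
    simp only [parse_spec_line, parse_spec_line_loop, pv_mappings, parse_spec_line_alt]
    rw [hin _ (by decide), hin _ (by decide), hin _ (by decide), hin _ (by decide), hin _ (by decide)]
    simp [hkc]
  | cons c r =>
    have hc : c = ':' := by
      have h2 := List.head_dropWhile_not (p := (· != ':')) (l := line.toList) (by rw [hd]; simp)
      simp only [hd, List.head_cons] at h2
      simpa using h2
    subst hc
    have hcs : line.toList = line.toList.takeWhile (· != ':') ++ ':' :: r := by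
      conv_lhs => rw [← hspan, hd]
    set k := line.toList.takeWhile (· != ':') with hkdef
    have hlen_ne : ¬ (k.length = line.toList.length) := by
      rw [hcs]; simp
    have hdrop : line.toList.drop (k.length + 1) = r := by
      rw [hcs, show k ++ ':' :: r = (k ++ [':']) ++ r by simp,
          show k.length + 1 = (k ++ [':']).length by simp]
      exact List.drop_left
    simp only [parse_spec_line, parse_spec_line_loop, pv_mappings]
    rw [pv_sw_iff line k r hcs hk "- Description:" "- Description" (by decide) (by decide),
        pv_sw_iff line k r hcs hk "- Source Persona:" "- Source Persona" (by decide) (by decide),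
        pv_sw_iff line k r hcs hk "- Traceability:" "- Traceability" (by decide) (by decide),
        pv_sw_iff line k r hcs hk "- Acceptance Criteria:" "- Acceptance Criteria" (by decide) (by decide),
        pv_sw_iff line k r hcs hk "- Notes:" "- Notes" (by decide) (by decide)]
    simp only [parse_spec_line_alt, pv_fields]
    simp only [← hkdef, if_neg hlen_ne, PySem.Dict.get?_mk_cons, pv_beq]
    by_cases h1 : ("- Description" : String).toList = k
    · simp only [h1, decide_true, if_true]
      rw [pv_value_eq line k r hcs "- Description:" "- Description" (by decide) h1, hdrop]
    have h1' : decide (("- Description" : String).toList = k) = false := decide_eq_false h1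
    simp only [h1', Bool.false_eq_true, if_false]
    by_cases h2 : ("- Source Persona" : String).toList = k
    · simp only [h2, decide_true, if_true]
      rw [pv_value_eq line k r hcs "- Source Persona:" "- Source Persona" (by decide) h2, hdrop]
    have h2' : decide (("- Source Persona" : String).toList = k) = false := decide_eq_false h2
    simp only [h2', Bool.false_eq_true, if_false]
    by_cases h3 : ("- Traceability" : String).toList = k
    · simp only [h3, decide_true, if_true]
      rw [pv_value_eq line k r hcs "- Traceability:" "- Traceability" (by decide) h3, hdrop]
    have h3' : decide (("- Traceability" : String).toList = k) = false := decide_eq_false h3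
    simp only [h3', Bool.false_eq_true, if_false]
    by_cases h4 : ("- Acceptance Criteria" : String).toList = k
    · simp only [h4, decide_true, if_true]
      rw [pv_value_eq line k r hcs "- Acceptance Criteria:" "- Acceptance Criteria" (by decide) h4, hdrop]
    have h4' : decide (("- Acceptance Criteria" : String).toList = k) = false := decide_eq_false h4
    simp only [h4', Bool.false_eq_true, if_false]
    by_cases h5 : ("- Notes" : String).toList = k
    · simp only [h5, decide_true, if_true]
      rw [pv_value_eq line k r hcs "- Notes:" "- Notes" (by decide) h5, hdrop]
    have h5' : decide (("- Notes" : String).toList = k) = false := decide_eq_false h5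
    simp only [h5', Bool.false_eq_true, if_false]
    rfl

-- ===== VERDICT (by name: the statement is the Claim_ definition above) =====
theorem parse_spec_line_spec : Claim_equal_parse_spec_line := by
  intro line _
  exact pv_main line
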